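-- pv_equiv track=rewrite | github.com/amirhajibabaei/AutoForce | theforce/util/util.py | iter_balanced
-- ===== SOURCE A (Python) =====
-- def iter_balanced(it1, it2):
--     less = min(len(it1), len(it2))
--     more = max(len(it1), len(it2))
--     left = len(it1) == less
--     a = more//less
--     b = more % less
--     chunks = [a+1 if j < b else a for j in range(less)]
--     # iterate
--     start = 0
--     for i, chunk in enumerate(chunks):
--         if left:
--             yield [it1[i]], [it2[j] for j in range(start, start+chunk)]
--         else:
--             yield [it1[j] for j in range(start, start+chunk)], [it2[i]]
--         start = start+chunk
-- ===== SOURCE B (Python) =====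
-- def iter_balanced(it1, it2):
--     # Greedy consumption: pair each next element of the shorter side with a
--     # ceil(m/k) run of the longer side's iterator, where m and k are the
--     # elements still remaining on the longer and shorter side.
--     if len(it1) <= len(it2):
--         short, long, left = it1, it2, True
--     else:
--         short, long, left = it2, it1, False
--     run = iter(long)
--     m, k = len(long), len(short)
--     for head in short:
--         chunk = -(-m // k)
--         part = [next(run) for _ in range(chunk)]
--         m -= chunk
--         k -= 1
--         yield ([head], part) if left else (part, [head])
-- ===== Notes on version B (the rewrite author's own statement) =====
-- stated objective: alternative
-- what changed: B replaces A's precomputed chunks list, enumerate loop and running start offset by greedy consumption: it pairs each next element of the shorter side with a ceil(m/k) run of the longer side's iterator, where m and k are the counts still remaining on each side.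
import Mathlib
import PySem

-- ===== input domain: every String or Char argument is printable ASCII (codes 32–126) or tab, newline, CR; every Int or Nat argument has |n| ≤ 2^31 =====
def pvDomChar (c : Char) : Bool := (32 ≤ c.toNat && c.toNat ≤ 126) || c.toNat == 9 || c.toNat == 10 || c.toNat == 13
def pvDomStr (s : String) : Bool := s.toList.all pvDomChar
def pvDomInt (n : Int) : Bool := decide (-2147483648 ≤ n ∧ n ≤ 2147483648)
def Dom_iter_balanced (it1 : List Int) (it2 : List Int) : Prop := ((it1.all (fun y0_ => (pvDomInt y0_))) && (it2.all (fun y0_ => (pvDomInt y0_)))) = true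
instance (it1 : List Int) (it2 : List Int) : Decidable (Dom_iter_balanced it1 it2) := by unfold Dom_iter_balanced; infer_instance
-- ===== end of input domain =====

-- B abandons A's divmod precomputation, chunks list and running start offset: it greedily
-- consumes the two sides, pairing each next element of the shorter side with a ceil(m/k)
-- run of the longer side's iterator (m, k = remaining counts); values proved equal on Pre_.

-- ===== PORT A =====
-- literal transliteration of A: chunks list, enumerate + fold carrying (start, output)
def iter_balanced (it1 : List Int) (it2 : List Int) : List (List Int × List Int) :=
  let less : Int := min (it1.length : Int) (it2.length : Int)
  let more : Int := max (it1.length : Int) (it2.length : Int)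
  let left : Bool := (it1.length : Int) == less
  let a : Int := PySem.Int.floordiv more less
  let b : Int := PySem.Int.mod more less
  let chunks : List Int := (PySem.List.pyRange 0 less 1).map (fun j => if j < b then a + 1 else a)
  (chunks.zipIdx.foldl
    (fun (st : Int × List (List Int × List Int)) ci =>
      let chunk := ci.1
      let i := ci.2
      let item :=
        if left then
          ([PySem.List.pyGetD it1 (i : Int) 0],
           (PySem.List.pyRange st.1 (st.1 + chunk) 1).map (fun j => PySem.List.pyGetD it2 j 0))
        else
          ((PySem.List.pyRange st.1 (st.1 + chunk) 1).map (fun j => PySem.List.pyGetD it1 j 0),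
           [PySem.List.pyGetD it2 (i : Int) 0])
      (st.1 + chunk, st.2 ++ [item]))
    (0, [])).2

-- ===== PORT B =====
-- literal transliteration of Source B's for-loop: recursion over short, carrying the longer
-- side's iterator (the list of its not-yet-consumed elements) and the counters m, k;
-- chunk = -(-m//k); '[next(run) for _ in range(chunk)]' is the next chunk elements of the
-- iterator, i.e. take/drop of the remaining list (exact: the caller passes m = len(run)
-- and k = len(short), so chunk never overruns the iterator)
def ibLoop (short : List Int) (run : List Int) (m : Int) (k : Int) (left : Bool) :
    List (List Int × List Int) :=
  match short with
  | [] => []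
  | head :: rest =>
    let chunk : Int := -(PySem.Int.floordiv (-m) k)
    let part := run.take chunk.toNat
    (if left then ([head], part) else (part, [head])) ::
      ibLoop rest (run.drop chunk.toNat) (m - chunk) (k - 1) left

def iter_balanced_alt (it1 : List Int) (it2 : List Int) : List (List Int × List Int) :=
  if it1.length ≤ it2.length then ibLoop it1 it2 (it2.length : Int) (it1.length : Int) true
  else ibLoop it2 it1 (it1.length : Int) (it2.length : Int) false

-- ===== PRECONDITION & SPEC =====
-- Pre_ excludes exactly the inputs on which A raises ZeroDivisionError: either list empty.
def Pre_iter_balanced (it1 : List Int) (it2 : List Int) : Prop := it1 ≠ [] ∧ it2 ≠ []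
instance (it1 : List Int) (it2 : List Int) : Decidable (Pre_iter_balanced it1 it2) := by
  unfold Pre_iter_balanced; infer_instance
def pvWitness_iter_balanced : List Int × List Int := ([1, 2], [10, 20, 30, 40, 50])

def Spec_iter_balanced (it1 : List Int) (it2 : List Int) (out : List (List Int × List Int)) : Prop := out = iter_balanced_alt it1 it2
instance (it1 : List Int) (it2 : List Int) (out : List (List Int × List Int)) : Decidable (Spec_iter_balanced it1 it2 out) := by unfold Spec_iter_balanced; infer_instance

-- ===== CLAIM (what is proved, stated in full; the proofs are below) =====
def Claim_equal_iter_balanced : Prop := ∀ (it1 : List Int) (it2 : List Int), Dom_iter_balanced it1 it2 → Pre_iter_balanced it1 it2 → Spec_iter_balanced it1 it2 (iter_balanced it1 it2)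

-- ===== LEMMAS AND PROOFS =====

-- proof-side common form: the i-th yielded pair, boundaries in closed form over Nat
def cfPair (short long : List Int) (left : Bool) (i : Nat) : List Int × List Int :=
  let a := long.length / short.length
  let b := long.length % short.length
  let part := (long.drop (i * a + min i b)).take (if i < b then a + 1 else a)
  if left then ([short.getD i 0], part) else (part, [short.getD i 0])

theorem zipIdx_map_range (f : Nat → Int) (n : Nat) :
    ((List.range n).map f).zipIdx = (List.range n).map (fun j => (f j, j)) := by
  induction n with
  | zero => simp
  | succ n ih => simp [List.range_succ, List.zipIdx_append, ih]

theorem fold_shape {β : Type} (f : Nat → Int) (g : Nat → Int → Int → β) (n : Nat) :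
    (((List.range n).map (fun j => (f j, j))).foldl
      (fun (st : Int × List β) ci => (st.1 + ci.1, st.2 ++ [g ci.2 st.1 ci.1])) (0, []))
    = (((List.range n).map f).sum,
       (List.range n).map (fun i => g i (((List.range i).map f).sum) (f i))) := by
  induction n with
  | zero => simp
  | succ n ih => simp [List.range_succ, List.foldl_append, ih]

theorem Ssum_closed (a b : Nat) (i : Nat) :
    ((List.range i).map ((fun j => if j < (b : Int) then (a : Int) + 1 else (a : Int)) ∘
        (fun k : Nat => (k : Int)))).sum
    = (i : Int) * a + ((min i b : Nat) : Int) := by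
  induction i with
  | zero => simp
  | succ i ih =>
    rw [List.range_succ, List.map_append, List.sum_append, ih]
    simp only [List.map_cons, List.map_nil, List.sum_cons, List.sum_nil, add_zero,
      Function.comp_apply]
    by_cases h : i < b
    · have h1 : min (i+1) b = min i b + 1 := by omega
      rw [if_pos (by exact_mod_cast h), h1]
      push_cast; ring
    · have h1 : min (i+1) b = min i b := by omega
      rw [if_neg (by exact_mod_cast h), h1]
      push_cast; ring

theorem drop_take_eq_map_range (xs : List Int) (s c : Nat) (h : s + c ≤ xs.length) :
    (xs.drop s).take c = (List.range c).map (fun k => xs.getD (s + k) 0) := by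
  apply List.ext_getElem
  · simp; omega
  · intro k hk1 hk2
    simp only [List.getElem_take, List.getElem_drop, List.getElem_map, List.getElem_range]
    rw [List.getD_eq_getElem]

theorem chunk_bound (less more i : Nat) (h0 : 0 < less) (hi : i < less) :
    i * (more / less) + min i (more % less)
      + (if i < more % less then more / less + 1 else more / less) ≤ more := by
  have hdm := Nat.div_add_mod more less
  have hb : more % less < less := Nat.mod_lt _ h0
  have hstep : i * (more / less) + min i (more % less)
      + (if i < more % less then more / less + 1 else more / less)
      = (i+1) * (more / less) + min (i+1) (more % less) := by
    split_ifs with h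
    · have h1 : min (i+1) (more % less) = min i (more % less) + 1 := by omega
      rw [h1, Nat.succ_mul]; ring
    · have h1 : min (i+1) (more % less) = min i (more % less) := by omega
      rw [h1, Nat.succ_mul]; ring
  rw [hstep]
  have hmul : (i + 1) * (more / less) ≤ less * (more / less) :=
    Nat.mul_le_mul_right _ (by omega)
  omega

-- ceil chunk as a Nat: Python's -(-m // n)
theorem ceil_chunk (m n : Nat) (hn : 0 < n) :
    -(PySem.Int.floordiv (-(m : Int)) (n : Int))
      = (((if 0 < m % n then m / n + 1 else m / n) : Nat) : Int) := by
  rw [PySem.Int.neg_floordiv_neg_eq_iff_of_pos (by exact_mod_cast hn)]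
  have hdm := Nat.div_add_mod m n
  have hb : m % n < n := Nat.mod_lt _ hn
  have hn' : (1 : Int) ≤ (n : Int) := by exact_mod_cast hn
  constructor
  · split_ifs with h
    · have h1 : n * (m / n) < m := by omega
      have h1' : ((n : Int)) * ((m / n : Nat) : Int) < (m : Int) := by exact_mod_cast h1
      push_cast; push_cast at h1'; nlinarith
    · have h0 : m % n = 0 := by omega
      have h1 : n * (m / n) = m := by omega
      have h1' : ((n : Int)) * ((m / n : Nat) : Int) = (m : Int) := by exact_mod_cast h1
      push_cast; push_cast at h1'; nlinarith
  · split_ifs with h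
    · have h1 : m ≤ n * (m / n) + n := by omega
      have h1' : (m : Int) ≤ ((n : Int)) * ((m / n : Nat) : Int) + n := by exact_mod_cast h1
      push_cast; push_cast at h1'; nlinarith
    · have h0 : m % n = 0 := by omega
      have h1 : n * (m / n) = m := by omega
      have h1' : ((n : Int)) * ((m / n : Nat) : Int) = (m : Int) := by exact_mod_cast h1
      push_cast; push_cast at h1'; nlinarith

-- shift step: the (i+1)-th closed-form pair equals the i-th pair of the consumed state
theorem cfPair_shift (h : Int) (t long : List Int) (left : Bool) (i : Nat)
    (ht : 0 < t.length) :
    cfPair (h :: t) long left (i + 1)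
      = cfPair t (long.drop (if 0 < long.length % (t.length + 1)
          then long.length / (t.length + 1) + 1 else long.length / (t.length + 1))) left i := by
  obtain ⟨a, b, hab, hblt⟩ : ∃ a b, long.length = (t.length + 1) * a + b ∧ b < t.length + 1 :=
    ⟨long.length / (t.length + 1), long.length % (t.length + 1),
      by have := Nat.div_add_mod long.length (t.length + 1); omega,
      Nat.mod_lt _ (by omega)⟩
  set n := t.length with hn
  have hdiva : long.length / (n + 1) = a := by
    rw [hab, Nat.mul_add_div (by omega), Nat.div_eq_of_lt hblt]; omega
  have hmoda : long.length % (n + 1) = b := by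
    rw [hab, Nat.mul_add_mod, Nat.mod_eq_of_lt hblt]
  rw [hdiva, hmoda]
  set c0 : Nat := if 0 < b then a + 1 else a with hc0
  have hrem : long.length - c0 = n * a + (b - 1) := by
    rw [hab, hc0]; split_ifs with h0 <;> ring_nf <;> omega
  have hlen : (long.drop c0).length = n * a + (b - 1) := by
    rw [List.length_drop, hrem]
  have hdiva' : (long.drop c0).length / n = a := by
    rw [hlen, Nat.mul_add_div ht, Nat.div_eq_of_lt (by omega)]; omega
  have hmoda' : (long.drop c0).length % n = b - 1 := by
    rw [hlen, Nat.mul_add_mod, Nat.mod_eq_of_lt (by omega)]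
  have hcond : (if i < b - 1 then a + 1 else a) = (if i + 1 < b then a + 1 else a) := by
    by_cases hb2 : i + 1 < b
    · rw [if_pos (by omega), if_pos hb2]
    · rw [if_neg (by omega), if_neg hb2]
  have hstart : c0 + (i * a + min i (b - 1)) = (i + 1) * a + min (i + 1) b := by
    rw [Nat.succ_mul, hc0]; split_ifs with h0 <;> omega
  simp only [cfPair, List.length_cons, ← hn, hdiva, hmoda, hdiva', hmoda',
    List.drop_drop, List.getD_cons_succ, hcond, hstart]

-- B's loop equals the closed-form map (m, k carry the two remaining lengths)
theorem ibLoop_eq_cfMap (short long : List Int) (left : Bool) (m k : Int)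
    (hm : m = long.length) (hk : k = short.length) :
    ibLoop short long m k left = (List.range short.length).map (cfPair short long left) := by
  induction short generalizing long m k with
  | nil => simp [ibLoop]
  | cons h t ih =>
    subst hm hk
    simp only [ibLoop, List.length_cons]
    rw [List.range_succ_eq_map, List.map_cons, List.map_map]
    have hchunk : -(PySem.Int.floordiv (-((long.length : Nat) : Int)) (((t.length + 1 : Nat)) : Int))
        = (((if 0 < long.length % (t.length + 1) then long.length / (t.length + 1) + 1
            else long.length / (t.length + 1)) : Nat) : Int) :=
      ceil_chunk long.length (t.length + 1) (by omega)
    set c0 : Nat := if 0 < long.length % (t.length + 1) then long.length / (t.length + 1) + 1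
        else long.length / (t.length + 1) with hc0
    have hc0le : c0 ≤ long.length := by
      rw [hc0]
      rcases Nat.eq_zero_or_pos (long.length % (t.length + 1)) with h0 | h0
      · rw [if_neg (by omega)]; exact Nat.div_le_self _ _
      · rw [if_pos h0]
        have hml := Nat.mod_le long.length (t.length + 1)
        have hn1 : 1 < t.length + 1 := by
          rcases Nat.lt_or_ge 1 (t.length + 1) with hgt | hle1
          · exact hgt
          · exfalso
            have h3 : t.length = 0 := by omega
            rw [h3] at h0; exact absurd h0 (by simp [Nat.mod_one])
        have := Nat.div_lt_self (by omega : 0 < long.length) hn1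
        omega
    have htn : ((((c0 : Nat)) : Int)).toNat = c0 := Int.toNat_natCast c0
    rw [hchunk]
    congr 1
    · -- head pair
      rw [htn]
      simp only [cfPair, List.length_cons, List.drop_zero, List.getD_cons_zero,
        Nat.zero_mul, Nat.zero_add, Nat.zero_min, ← hc0]
    · -- tail
      rw [htn, ih (long.drop c0) _ _ (by simp only [List.length_drop]; omega)
        (by push_cast; ring)]
      rcases Nat.eq_zero_or_pos t.length with ht0 | ht
      · have : t = [] := List.length_eq_zero_iff.mp ht0
        simp [this]
      · apply List.map_congr_left
        intro i hi
        exact (cfPair_shift h t long left i ht).symm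

-- common finishing step: rewrite one fold element into the i-th closed-form pair's chunk
theorem range_map_eq_drop_take (long : List Int) (less : Nat) (k : Nat)
    (h0 : 0 < less) (hk : k < less) :
    (PySem.List.pyRange
        ((k * (long.length / less) + min k (long.length % less) : Nat) : Int)
        (((k * (long.length / less) + min k (long.length % less) : Nat) : Int)
          + ((if k < long.length % less then long.length / less + 1
              else long.length / less : Nat) : Int)) 1).map
      (fun j => PySem.List.pyGetD long j 0)
      = (long.drop (k * (long.length / less) + min k (long.length % less))).take
          (if k < long.length % less then long.length / less + 1 else long.length / less) := by
  have hbound := chunk_bound less long.length k h0 hk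
  rw [PySem.List.pyRange_one]
  set s := k * (long.length / less) + min k (long.length % less) with hsdef
  set c := (if k < long.length % less then long.length / less + 1
      else long.length / less) with hcdef
  have htn : (((s : Int) + (c : Int)) - (s : Int)).toNat = c := by omega
  rw [htn, drop_take_eq_map_range long s c (by omega), List.map_map]
  apply List.map_congr_left
  intro j hj
  simp only [Function.comp]
  have : (s : Int) + (j : Int) = ((s + j : Nat) : Int) := by push_cast; ring
  rw [this, PySem.List.pyGetD_natCast]

-- A equals the closed-form map when the first list is the shorter one (left = true)
theorem A_eq_cfMap_left (it1 it2 : List Int) (h1 : 0 < it1.length)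
    (hle : it1.length ≤ it2.length) :
    iter_balanced it1 it2 = (List.range it1.length).map (cfPair it1 it2 true) := by
  have hle' : (it1.length : Int) ≤ (it2.length : Int) := by exact_mod_cast hle
  have hmin : min (it1.length : Int) (it2.length : Int) = (it1.length : Int) := min_eq_left hle'
  have hmax : max (it1.length : Int) (it2.length : Int) = (it2.length : Int) := max_eq_right hle'
  simp only [iter_balanced, hmin, hmax, beq_self_eq_true, if_true,
    PySem.Int.floordiv_natCast, PySem.Int.mod_natCast, PySem.List.pyRange_zero_natCast,
    List.map_map]
  rw [zipIdx_map_range,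
    fold_shape
      ((fun j => if j < ((it2.length % it1.length : Nat) : Int)
          then ((it2.length / it1.length : Nat) : Int) + 1
          else ((it2.length / it1.length : Nat) : Int)) ∘ (fun k : Nat => (k : Int)))
      (fun i s c =>
        ([PySem.List.pyGetD it1 (i : Int) 0],
         (PySem.List.pyRange s (s + c) 1).map (fun j => PySem.List.pyGetD it2 j 0)))
      it1.length]
  simp only
  apply List.map_congr_left
  intro k hk
  have hk' : k < it1.length := List.mem_range.mp hk
  simp only [Function.comp_apply, Ssum_closed]
  have hs : ((k : Int) * ((it2.length / it1.length : Nat) : Int)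
      + ((min k (it2.length % it1.length) : Nat) : Int))
      = ((k * (it2.length / it1.length) + min k (it2.length % it1.length) : Nat) : Int) := by
    push_cast; ring
  have hc : (if (k : Int) < ((it2.length % it1.length : Nat) : Int)
      then ((it2.length / it1.length : Nat) : Int) + 1 else ((it2.length / it1.length : Nat) : Int))
      = ((if k < it2.length % it1.length then it2.length / it1.length + 1
          else it2.length / it1.length : Nat) : Int) := by
    split_ifs with h h2 h2
    · push_cast; ring
    · exact absurd (by exact_mod_cast h) h2
    · exact absurd (by exact_mod_cast h2) h
    · rfl
  rw [hs, hc, range_map_eq_drop_take it2 it1.length k h1 hk']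
  simp [cfPair, PySem.List.pyGetD_natCast]

-- A equals the closed-form map when the second list is the (strictly) shorter one (left = false)
theorem A_eq_cfMap_right (it1 it2 : List Int) (h2 : 0 < it2.length)
    (hlt : it2.length < it1.length) :
    iter_balanced it1 it2 = (List.range it2.length).map (cfPair it2 it1 false) := by
  have hle'' : (it2.length : Int) ≤ (it1.length : Int) := by exact_mod_cast Nat.le_of_lt hlt
  have hne : ¬ ((it1.length : Int) = (it2.length : Int)) := by
    intro h; exact absurd (Nat.cast_injective h) (by omega)
  have hmin : min (it1.length : Int) (it2.length : Int) = (it2.length : Int) := min_eq_right hle''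
  have hmax : max (it1.length : Int) (it2.length : Int) = (it1.length : Int) := max_eq_left hle''
  simp only [iter_balanced, hmin, hmax, beq_iff_eq, if_neg hne,
    PySem.Int.floordiv_natCast, PySem.Int.mod_natCast, PySem.List.pyRange_zero_natCast,
    List.map_map]
  rw [zipIdx_map_range,
    fold_shape
      ((fun j => if j < ((it1.length % it2.length : Nat) : Int)
          then ((it1.length / it2.length : Nat) : Int) + 1
          else ((it1.length / it2.length : Nat) : Int)) ∘ (fun k : Nat => (k : Int)))
      (fun i s c =>
        ((PySem.List.pyRange s (s + c) 1).map (fun j => PySem.List.pyGetD it1 j 0),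
         [PySem.List.pyGetD it2 (i : Int) 0]))
      it2.length]
  simp only
  apply List.map_congr_left
  intro k hk
  have hk' : k < it2.length := List.mem_range.mp hk
  simp only [Function.comp_apply, Ssum_closed]
  have hs : ((k : Int) * ((it1.length / it2.length : Nat) : Int)
      + ((min k (it1.length % it2.length) : Nat) : Int))
      = ((k * (it1.length / it2.length) + min k (it1.length % it2.length) : Nat) : Int) := by
    push_cast; ring
  have hc : (if (k : Int) < ((it1.length % it2.length : Nat) : Int)
      then ((it1.length / it2.length : Nat) : Int) + 1 else ((it1.length / it2.length : Nat) : Int))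
      = ((if k < it1.length % it2.length then it1.length / it2.length + 1
          else it1.length / it2.length : Nat) : Int) := by
    split_ifs with h h2 h2
    · push_cast; ring
    · exact absurd (by exact_mod_cast h) h2
    · exact absurd (by exact_mod_cast h2) h
    · rfl
  rw [hs, hc, range_map_eq_drop_take it1 it2.length k h2 hk']
  simp [cfPair, PySem.List.pyGetD_natCast]

theorem iter_balanced_eq_alt (it1 it2 : List Int) (h1 : it1 ≠ []) (h2 : it2 ≠ []) :
    iter_balanced it1 it2 = iter_balanced_alt it1 it2 := by
  have hp1 : 0 < it1.length := List.length_pos_of_ne_nil h1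
  have hp2 : 0 < it2.length := List.length_pos_of_ne_nil h2
  by_cases hle : it1.length ≤ it2.length
  · rw [iter_balanced_alt, if_pos hle, ibLoop_eq_cfMap it1 it2 true _ _ rfl rfl,
      A_eq_cfMap_left it1 it2 hp1 hle]
  · rw [iter_balanced_alt, if_neg hle, ibLoop_eq_cfMap it2 it1 false _ _ rfl rfl,
      A_eq_cfMap_right it1 it2 hp2 (Nat.lt_of_not_le hle)]

-- ===== VERDICT (by name: the statement is the Claim_ definition above) =====
theorem iter_balanced_spec : Claim_equal_iter_balanced := by
  intro it1 it2 _ hpre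
  exact (iter_balanced_eq_alt it1 it2 hpre.1 hpre.2)
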